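-- pv_equiv track=rewrite | github.com/Pvnn/query-aware-rag | src/budget_predictor/label_generator.py | find_gold_overlap
-- ===== SOURCE A (Python) =====
-- def find_gold_overlap(gold_context: str, retrieved_docs: list[str]):
--     """
--     Returns list of (doc_index, matching_sentences)
--     """
--     gold_sents = [s.strip() for s in gold_context.split(".") if s.strip()]
--     overlaps = []
--
--     for i, doc in enumerate(retrieved_docs):
--         doc_lower = doc.lower()
--         matched = []
--
--         for gs in gold_sents:
--             if gs.lower() in doc_lower:
--                 matched.append(gs)
--
--         if matched:
--             overlaps.append((i, matched))
--
--     return overlaps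
-- ===== SOURCE B (Python) =====
-- def find_gold_overlap(gold_context: str, retrieved_docs: list[str]):
--     gold_sents = [s.strip() for s in gold_context.split(".") if s.strip()]
--     docs_low = [d.lower() for d in retrieved_docs]
--     acc = [[] for _ in docs_low]
--     for gs in gold_sents:
--         gl = gs.lower()
--         acc = [m + [gs] if gl in dl else m for dl, m in zip(docs_low, acc)]
--     return [(i, m) for i, m in enumerate(acc) if m]
-- ===== Notes on version B (the rewrite author's own statement) =====
-- stated objective: faster
-- what changed: Transposed traversal: instead of scanning all gold sentences per doc and re-lowering every sentence for every doc, B lowers every doc and every sentence exactly once, makes one sentence-major pass that extends per-doc match buckets via zip, and emits the non-empty buckets with their indices.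
import Mathlib
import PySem

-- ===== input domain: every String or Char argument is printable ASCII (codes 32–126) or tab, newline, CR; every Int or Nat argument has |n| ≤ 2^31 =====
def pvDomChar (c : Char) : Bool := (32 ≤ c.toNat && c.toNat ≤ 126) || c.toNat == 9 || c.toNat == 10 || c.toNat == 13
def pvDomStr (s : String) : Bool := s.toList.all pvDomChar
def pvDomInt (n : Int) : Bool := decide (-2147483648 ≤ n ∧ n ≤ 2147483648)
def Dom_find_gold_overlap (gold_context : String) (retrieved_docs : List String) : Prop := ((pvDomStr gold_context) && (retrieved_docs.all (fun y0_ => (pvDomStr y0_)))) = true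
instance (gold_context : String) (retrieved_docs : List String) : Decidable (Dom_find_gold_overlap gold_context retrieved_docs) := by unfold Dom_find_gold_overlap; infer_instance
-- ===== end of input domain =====

-- B transposes A's doc-major double loop into one sentence-major pass over per-doc
-- buckets, lowering every string exactly once (objective: alternative traversal).

-- ===== PORT A =====
def find_gold_overlap (gold_context : String) (retrieved_docs : List String) : List (Int × List String) :=
  let gold_sents := ((PySem.Str.split? gold_context ".").getD []).filterMap
      (fun s => if PySem.Str.strip s ≠ "" then some (PySem.Str.strip s) else none)
  (PySem.List.enumerate retrieved_docs).foldl
    (fun overlaps p =>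
      let doc_lower := PySem.Str.lower p.2
      let matched := gold_sents.foldl
        (fun matched gs => if PySem.Str.isIn (PySem.Str.lower gs) doc_lower then matched ++ [gs] else matched) []
      if matched ≠ [] then overlaps ++ [(p.1, matched)] else overlaps) []

-- ===== PORT B =====
def find_gold_overlap_alt (gold_context : String) (retrieved_docs : List String) : List (Int × List String) :=
  let gold_sents := ((PySem.Str.split? gold_context ".").getD []).filterMap
      (fun s => if PySem.Str.strip s ≠ "" then some (PySem.Str.strip s) else none)
  let docs_low := retrieved_docs.map PySem.Str.lower
  let acc0 : List (List String) := docs_low.map (fun _ => [])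
  let acc := gold_sents.foldl
    (fun acc gs =>
      let gl := PySem.Str.lower gs
      (docs_low.zip acc).map (fun p => if PySem.Str.isIn gl p.1 then p.2 ++ [gs] else p.2)) acc0
  (PySem.List.enumerate acc).filterMap (fun p => if p.2 ≠ [] then some (p.1, p.2) else none)

-- ===== PRECONDITION & SPEC =====
def Spec_find_gold_overlap (gold_context : String) (retrieved_docs : List String) (out : List (Int × List String)) : Prop := out = find_gold_overlap_alt gold_context retrieved_docs
instance (gold_context : String) (retrieved_docs : List String) (out : List (Int × List String)) : Decidable (Spec_find_gold_overlap gold_context retrieved_docs out) := by unfold Spec_find_gold_overlap; infer_instance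

-- ===== CLAIM (what is proved, stated in full; the proofs are below) =====
def Claim_equal_find_gold_overlap : Prop := ∀ (gold_context : String) (retrieved_docs : List String), Dom_find_gold_overlap gold_context retrieved_docs → Spec_find_gold_overlap gold_context retrieved_docs (find_gold_overlap gold_context retrieved_docs)

-- ===== LEMMAS AND PROOFS =====

-- A's inner loop collects exactly the filter of the gold sentences.
theorem inner_loop_eq_filter (G : List String) (q : String → Bool) (init : List String) :
    G.foldl (fun matched gs => if q gs then matched ++ [gs] else matched) init
      = init ++ G.filter q := by
  induction G generalizing init with
  | nil => simp
  | cons g G ih =>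
    simp only [List.foldl_cons, List.filter_cons]
    by_cases h : q g = true <;> simp [h, ih]

-- A's outer loop is a filterMap over the enumerated docs.
theorem outer_loop_eq_filterMap (f : Int × String → List String)
    (docs : List String) (s : Int) (ovl : List (Int × List String)) :
    (PySem.List.enumerate docs s).foldl
        (fun overlaps p => if f p ≠ [] then overlaps ++ [(p.1, f p)] else overlaps) ovl
      = ovl ++ (PySem.List.enumerate docs s).filterMap
          (fun p => if f p ≠ [] then some (p.1, f p) else none) := by
  induction docs generalizing s ovl with
  | nil => simp [PySem.List.enumerate_nil]
  | cons d docs ih =>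
    rw [PySem.List.enumerate_cons]
    simp only [List.foldl_cons, List.filterMap_cons]
    rw [ih]
    by_cases h : f (s, d) = [] <;> simp [h]

-- re-zipping a first-component-preserving map
theorem zip_map_rezip {α β γ : Type} (f : α × β → γ) :
    ∀ (dl : List α) (acc : List β),
      dl.zip ((dl.zip acc).map f) = (dl.zip acc).map (fun p => (p.1, f p))
  | [], _ => by simp
  | _ :: _, [] => by simp
  | d :: dl, m :: acc => by
    simp [List.zip_cons_cons, zip_map_rezip f dl acc]

-- B's sentence-major fold, pointwise: each bucket ends as its doc's filter.
theorem bucket_fold_eq_filter (G : List String) :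
    ∀ (dl : List String) (acc : List (List String)), acc.length = dl.length →
      G.foldl
        (fun acc gs =>
          (dl.zip acc).map (fun p => if PySem.Str.isIn (PySem.Str.lower gs) p.1 then p.2 ++ [gs] else p.2)) acc
        = (dl.zip acc).map (fun p => p.2 ++ G.filter (fun gs => PySem.Str.isIn (PySem.Str.lower gs) p.1)) := by
  induction G with
  | nil =>
    intro dl acc h
    simp only [List.foldl_nil, List.filter_nil, List.append_nil]
    exact (List.map_snd_zip (le_of_eq h)).symm
  | cons g G ih =>
    intro dl acc h
    simp only [List.foldl_cons]
    rw [ih dl _ (by simp [List.length_zip, h]),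
        zip_map_rezip, List.map_map]
    refine List.map_congr_left fun p _ => ?_
    simp only [Function.comp, List.filter_cons]
    split_ifs with hc <;> simp

-- enumerate of a mapped list
theorem enumerate_map {α β : Type} (f : α → β) (l : List α) (s : Int) :
    PySem.List.enumerate (l.map f) s = (PySem.List.enumerate l s).map (fun p => (p.1, f p.2)) := by
  induction l generalizing s with
  | nil => simp [PySem.List.enumerate_nil]
  | cons x l ih => simp [PySem.List.enumerate_cons, ih]

-- ===== VERDICT (by name: the statement is the Claim_ definition above) =====
theorem zip_self_map {α β : Type} (l : List α) (g : α → β) :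
    l.zip (l.map g) = l.map (fun a => (a, g a)) := by
  induction l with
  | nil => rfl
  | cons x l ih => simp [ih]

theorem find_gold_overlap_spec : Claim_equal_find_gold_overlap := by
  intro gold_context retrieved_docs _
  unfold Spec_find_gold_overlap find_gold_overlap find_gold_overlap_alt
  simp only []
  set G := ((PySem.Str.split? gold_context ".").getD []).filterMap
      (fun s => if PySem.Str.strip s ≠ "" then some (PySem.Str.strip s) else none) with hG
  -- A side
  simp only [inner_loop_eq_filter, List.nil_append]
  rw [outer_loop_eq_filterMap (fun p => G.filter (fun gs => PySem.Str.isIn (PySem.Str.lower gs) (PySem.Str.lower p.2)))]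
  simp only [List.nil_append]
  -- B side
  rw [bucket_fold_eq_filter G (retrieved_docs.map PySem.Str.lower)
        ((retrieved_docs.map PySem.Str.lower).map (fun _ => ([] : List String)))
        (by simp)]
  rw [zip_self_map, List.map_map, List.map_map, enumerate_map, List.filterMap_map]
  rfl
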